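-- pv_equiv track=rewrite | github.com/ZUENS2020/Sherpa | tests/test_env_rebuild_dispatch.py | _first_cycle
-- ===== SOURCE A (Python) =====
-- def _first_cycle(stages: list[str]) -> list[str]:
--     if not stages:
--         return []
--     out: list[str] = []
--     seen_first = False
--     for stage in stages:
--         if stage == "plan":
--             if seen_first:
--                 break
--             seen_first = True
--         out.append(stage)
--     return out
-- ===== SOURCE B (Python) =====
-- def _first_cycle(stages: list[str]) -> list[str]:
--     idx = [i for i, s in enumerate(stages) if s == "plan"]
--     if len(idx) >= 2:
--         return stages[:idx[1]]
--     return stages[:]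
-- ===== Notes on version B (the rewrite author's own statement) =====
-- stated objective: simpler
-- what changed: Replaced A's stateful flag-and-break accumulation loop by building the list of 'plan' marker positions once and returning a single slice up to the second marker (or a copy of the whole list).
import Mathlib
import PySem

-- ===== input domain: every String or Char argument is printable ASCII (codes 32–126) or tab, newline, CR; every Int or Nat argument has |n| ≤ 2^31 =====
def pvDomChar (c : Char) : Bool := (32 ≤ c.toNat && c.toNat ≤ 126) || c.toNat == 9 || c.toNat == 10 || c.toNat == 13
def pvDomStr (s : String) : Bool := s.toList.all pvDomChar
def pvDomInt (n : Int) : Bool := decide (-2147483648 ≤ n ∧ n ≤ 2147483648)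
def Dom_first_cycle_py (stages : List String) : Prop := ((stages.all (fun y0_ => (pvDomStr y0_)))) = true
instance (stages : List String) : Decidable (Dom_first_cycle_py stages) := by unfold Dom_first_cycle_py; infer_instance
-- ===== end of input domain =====

-- ===== PORT A =====
-- B builds the list of 'plan' positions and returns one slice instead of A's flag-and-break loop (objective: simpler).
-- loop body of A: accumulate stages, breaking at the second "plan"
def firstCycleLoop : List String → Bool → List String
  | [], _ => []
  | s :: rest, seen =>
    if s = "plan" then
      if seen then [] else s :: firstCycleLoop rest true
    else
      s :: firstCycleLoop rest seen

def first_cycle_py (stages : List String) : List String :=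
  if stages = [] then [] else firstCycleLoop stages false

-- ===== PORT B =====
-- [i for i, s in enumerate(stages) if s == "plan"], with the running index as an argument
def planIdxs : List String → Nat → List Nat
  | [], _ => []
  | s :: rest, i =>
    if s = "plan" then i :: planIdxs rest (i + 1) else planIdxs rest (i + 1)

def first_cycle_py_alt (stages : List String) : List String :=
  match planIdxs stages 0 with
  | _ :: j :: _ => stages.take j
  | _ => stages

-- ===== PRECONDITION & SPEC =====
def Spec_first_cycle_py (stages : List String) (out : List String) : Prop := out = first_cycle_py_alt stages
instance (stages : List String) (out : List String) : Decidable (Spec_first_cycle_py stages out) := by unfold Spec_first_cycle_py; infer_instance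

-- ===== CLAIM (what is proved, stated in full; the proofs are below) =====
def Claim_equal_first_cycle_py : Prop := ∀ (stages : List String), Dom_first_cycle_py stages → Spec_first_cycle_py stages (first_cycle_py stages)

-- ===== LEMMAS AND PROOFS =====

theorem planIdxs_succ (l : List String) (i : Nat) :
    planIdxs l (i + 1) = (planIdxs l i).map (· + 1) := by
  induction l generalizing i with
  | nil => simp [planIdxs]
  | cons s rest ih =>
    simp only [planIdxs]
    split
    · simp [ih (i + 1)]
    · exact ih (i + 1)

-- after the first "plan" was seen, A's loop takes up to the next "plan" (exclusive)
theorem loop_true_eq (l : List String) :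
    firstCycleLoop l true =
      (match planIdxs l 0 with
       | [] => l
       | j :: _ => l.take j) := by
  induction l with
  | nil => simp [firstCycleLoop, planIdxs]
  | cons s rest ih =>
    simp only [firstCycleLoop, planIdxs]
    by_cases h : s = "plan"
    · simp [h]
    · simp only [if_neg h, planIdxs_succ]
      cases hp : planIdxs rest 0 with
      | nil => simp [ih, hp]
      | cons j t => simp [ih, hp]

theorem loop_false_eq (l : List String) :
    firstCycleLoop l false = first_cycle_py_alt l := by
  induction l with
  | nil => simp [firstCycleLoop, first_cycle_py_alt, planIdxs]
  | cons s rest ih =>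
    simp only [firstCycleLoop, first_cycle_py_alt, planIdxs]
    by_cases h : s = "plan"
    · simp only [if_pos h, Bool.false_eq_true, if_false, loop_true_eq, planIdxs_succ]
      cases planIdxs rest 0 with
      | nil => simp
      | cons j t => simp
    · simp only [if_neg h, planIdxs_succ, ih, first_cycle_py_alt]
      cases planIdxs rest 0 with
      | nil => simp
      | cons j t =>
        cases t with
        | nil => simp
        | cons k t' => simp

-- ===== VERDICT (by name: the statement is the Claim_ definition above) =====
theorem first_cycle_py_spec : Claim_equal_first_cycle_py := by
  intro stages _
  unfold Spec_first_cycle_py first_cycle_py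
  split
  · subst stages; rfl
  · exact loop_false_eq stages
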